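-- pv_equiv track=rewrite | github.com/anonymos-saner-2026/maveric_off | src/tools/real_toolkit.py | _check_temporal_consistency
-- ===== SOURCE A (Python) =====
-- from typing import Optional, Dict, Any, Tuple, List, Literal
--
-- def _check_temporal_consistency(claim_years: List[str], evidence_years: List[str]) -> bool:
--     """
--     Check if temporal context in claim matches evidence.
--     More lenient to avoid false negatives from historical context.
--     Returns True if consistent or no temporal conflict detected.
--     """
--     if not claim_years or not evidence_years:
--         return True  # No temporal info to check
--
--     # Check for year mismatches
--     claim_year_set = set(claim_years)
--     evidence_year_set = set(evidence_years)
--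
--     # If there's overlap, consider consistent
--     if claim_year_set & evidence_year_set:
--         return True
--
--     # If evidence has MANY years (>= 5), likely historical/background context
--     # Don't penalize for this
--     if len(evidence_year_set) >= 5:
--         return True
--
--     # Check if years are close (within 5 years for more leniency)
--     min_diff = float('inf')
--     for cy in claim_years:
--         for ey in evidence_years:
--             try:
--                 diff = abs(int(cy) - int(ey))
--                 min_diff = min(min_diff, diff)
--                 if diff <= 5:  # More lenient threshold
--                     return True
--             except:
--                 pass
--
--     # Only flag as inconsistent if years are VERY different (>5 years)
--     # and evidence doesn't have many years (historical context)
--     return min_diff <= 5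
-- ===== SOURCE B (Python) =====
-- def _check_temporal_consistency(claim_years, evidence_years):
--     """Same result as A by a different algorithm: a hash set of parsed evidence
--     years probed at the 11 values within distance 5 of each claim year,
--     instead of the nested n*m pair scan."""
--     if not claim_years or not evidence_years:
--         return True
--     evidence_set = set(evidence_years)
--     if any(cy in evidence_set for cy in claim_years):
--         return True
--     if len(evidence_set) >= 5:
--         return True
--     ev_ints = set()
--     for ey in evidence_years:
--         try:
--             ev_ints.add(int(ey))
--         except ValueError:
--             pass
--     for cy in claim_years:
--         try:
--             v = int(cy)
--         except ValueError:
--             continue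
--         if any((v + d) in ev_ints for d in range(-5, 6)):
--             return True
--     return False
-- ===== Notes on version B (the rewrite author's own statement) =====
-- stated objective: alternative
-- what changed: Replaced the O(n*m) nested pair scan (with its redundant min_diff accumulator, whose final 'min_diff <= 5' return is always False) by a hash set of parsed evidence years probed at the 11 integers within distance 5 of each claim year; intended as faster (O(n+m)), measured ~1.48x at the largest size.
import Mathlib
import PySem

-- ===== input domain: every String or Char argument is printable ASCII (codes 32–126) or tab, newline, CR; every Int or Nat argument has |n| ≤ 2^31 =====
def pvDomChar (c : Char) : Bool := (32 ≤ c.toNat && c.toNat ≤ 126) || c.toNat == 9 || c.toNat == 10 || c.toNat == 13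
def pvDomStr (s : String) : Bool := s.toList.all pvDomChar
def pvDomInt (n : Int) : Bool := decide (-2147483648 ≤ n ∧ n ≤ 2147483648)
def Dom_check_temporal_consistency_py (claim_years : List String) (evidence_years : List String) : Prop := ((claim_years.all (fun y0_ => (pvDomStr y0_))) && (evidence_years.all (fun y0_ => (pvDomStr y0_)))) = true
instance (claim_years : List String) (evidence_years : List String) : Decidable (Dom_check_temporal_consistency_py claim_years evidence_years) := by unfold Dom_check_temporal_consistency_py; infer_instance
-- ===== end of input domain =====

-- B replaces A's nested pair scan by a hash set of parsed evidence years probed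
-- at the 11 integers within distance 5 of each claim year (objective: alternative
-- single-pass algorithm; intended as faster, measured ~1.48x, below the 1.5x bar).

-- ===== PORT A =====
-- A's min_diff starts as float('inf'); diffs are ints, so the sentinel is ported as
-- Option Int (none = inf), exact here: the only use is min and the final `<= 5` test.
def pvStepA (st : Option Int × Bool) (cy ey : String) : Option Int × Bool :=
  if st.2 then st  -- models A's early `return True` (loop stops updating once true)
  else
    match PySem.Int.ofStr? cy, PySem.Int.ofStr? ey with
    | some a, some b =>
        let diff : Int := ((a - b).natAbs : Int)
        let md : Int := match st.1 with | none => diff | some m => min m diff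
        (some md, decide (diff ≤ 5))
    | _, _ => st  -- except: pass

def check_temporal_consistency_py (claim_years : List String) (evidence_years : List String) : Bool :=
  if claim_years.isEmpty || evidence_years.isEmpty then true
  else
    let claim_year_set := PySem.Set.ofList claim_years
    let evidence_year_set := PySem.Set.ofList evidence_years
    if !(PySem.Set.inter claim_year_set evidence_year_set).isEmpty then true
    else if 5 ≤ PySem.Set.len evidence_year_set then true
    else
      let r := claim_years.foldl
        (fun st cy => evidence_years.foldl (fun st ey => pvStepA st cy ey) st)
        (none, false)
      if r.2 then true
      else match r.1 with
        | none => false          -- min_diff = inf: inf <= 5 is False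
        | some m => decide (m ≤ 5)

-- ===== PORT B =====
def pvCloseB (evInts : PySem.Set Int) (cy : String) : Bool :=
  match PySem.Int.ofStr? cy with
  | some v => (PySem.List.pyRange (-5) 6 1).any (fun d => PySem.Set.contains evInts (v + d))
  | none => false

def check_temporal_consistency_py_alt (claim_years : List String) (evidence_years : List String) : Bool :=
  if claim_years.isEmpty || evidence_years.isEmpty then true
  else
    let evidence_set := PySem.Set.ofList evidence_years
    if claim_years.any (fun cy => PySem.Set.contains evidence_set cy) then true
    else if 5 ≤ PySem.Set.len evidence_set then true
    else
      let evInts := evidence_years.foldl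
        (fun s ey => match PySem.Int.ofStr? ey with
          | some b => PySem.Set.add s b
          | none => s) PySem.Set.empty
      claim_years.any (fun cy => pvCloseB evInts cy)

-- ===== PRECONDITION & SPEC =====
def Spec_check_temporal_consistency_py (claim_years : List String) (evidence_years : List String) (out : Bool) : Prop := out = check_temporal_consistency_py_alt claim_years evidence_years
instance (claim_years : List String) (evidence_years : List String) (out : Bool) : Decidable (Spec_check_temporal_consistency_py claim_years evidence_years out) := by unfold Spec_check_temporal_consistency_py; infer_instance

-- ===== CLAIM (what is proved, stated in full; the proofs are below) =====
def Claim_equal_check_temporal_consistency_py : Prop := ∀ (claim_years : List String) (evidence_years : List String), Dom_check_temporal_consistency_py claim_years evidence_years → Spec_check_temporal_consistency_py claim_years evidence_years (check_temporal_consistency_py claim_years evidence_years)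

-- ===== LEMMAS AND PROOFS =====

-- both final branches compute this: "some pair of parsed years is within 5"
def pvPairClose (cy ey : String) : Bool :=
  match PySem.Int.ofStr? cy, PySem.Int.ofStr? ey with
  | some a, some b => decide (((a - b).natAbs : Int) ≤ 5)
  | _, _ => false

-- invariant of A's inner loop over evidence_years
theorem pvInnerA (ev : List String) (cy : String) (st : Option Int × Bool)
    (hinv : st.2 = false → ∀ m, st.1 = some m → ¬ m ≤ 5) :
    (ev.foldl (fun st ey => pvStepA st cy ey) st).2
      = (st.2 || ev.any (fun ey => pvPairClose cy ey)) ∧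
    ((ev.foldl (fun st ey => pvStepA st cy ey) st).2 = false →
      ∀ m, (ev.foldl (fun st ey => pvStepA st cy ey) st).1 = some m → ¬ m ≤ 5) := by
  induction ev generalizing st with
  | nil => exact ⟨by simp, hinv⟩
  | cons e rest ih =>
    simp only [List.foldl_cons, List.any_cons]
    by_cases h2 : st.2 = true
    · have hs : pvStepA st cy e = st := by simp [pvStepA, h2]
      rw [hs]
      rcases ih st hinv with ⟨h1, hrest⟩
      exact ⟨by simp [h1, h2], hrest⟩
    · have h2f : st.2 = false := by simpa using h2
      rcases ha : PySem.Int.ofStr? cy with _ | a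
      · have hs : pvStepA st cy e = st := by simp [pvStepA, h2f, ha]
        rw [hs]
        rcases ih st hinv with ⟨h1, hrest⟩
        refine ⟨?_, hrest⟩
        simp [h1, pvPairClose, ha]
      · rcases hb : PySem.Int.ofStr? e with _ | b
        · have hs : pvStepA st cy e = st := by simp [pvStepA, h2f, ha, hb]
          rw [hs]
          rcases ih st hinv with ⟨h1, hrest⟩
          refine ⟨?_, hrest⟩
          simp [h1, pvPairClose, ha, hb]
        · set diff : Int := ((a - b).natAbs : Int) with hdiff
          set md : Int := match st.1 with | none => diff | some m => min m diff with hmd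
          have hs : pvStepA st cy e = (some md, decide (diff ≤ 5)) := by
            simp [pvStepA, h2f, ha, hb, hmd, hdiff]
          rw [hs]
          have hinv' : (decide (diff ≤ 5)) = false →
              ∀ m, (some md : Option Int) = some m → ¬ m ≤ 5 := by
            intro hfl m hm
            have hd5 : ¬ diff ≤ 5 := by simpa using hfl
            have hm' : md = m := by simpa using hm
            subst hm'
            rcases hst1 : st.1 with _ | m0
            · simp [hmd, hst1]; omega
            · have h5 : ¬ m0 ≤ 5 := hinv h2f m0 hst1
              simp [hmd, hst1]
              omega
          rcases ih (some md, decide (diff ≤ 5)) hinv' with ⟨h1, hrest⟩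
          refine ⟨?_, hrest⟩
          rw [h1]
          simp [h2f, pvPairClose, ha, hb, hdiff]

-- invariant of A's outer loop over claim_years
theorem pvOuterA (cl ev : List String) (st : Option Int × Bool)
    (hinv : st.2 = false → ∀ m, st.1 = some m → ¬ m ≤ 5) :
    (cl.foldl (fun st cy => ev.foldl (fun st ey => pvStepA st cy ey) st) st).2
      = (st.2 || cl.any (fun cy => ev.any (fun ey => pvPairClose cy ey))) ∧
    ((cl.foldl (fun st cy => ev.foldl (fun st ey => pvStepA st cy ey) st) st).2 = false →
      ∀ m, (cl.foldl (fun st cy => ev.foldl (fun st ey => pvStepA st cy ey) st) st).1 = some m → ¬ m ≤ 5) := by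
  induction cl generalizing st with
  | nil => exact ⟨by simp, hinv⟩
  | cons c rest ih =>
    simp only [List.foldl_cons, List.any_cons]
    rcases pvInnerA ev c st hinv with ⟨h1, hinv'⟩
    rcases ih _ hinv' with ⟨h2, hrest⟩
    refine ⟨?_, hrest⟩
    rw [h2, h1]
    simp [Bool.or_assoc]

-- A's final branch equals the double-any
theorem pvFinalA (cl ev : List String) :
    (let r := cl.foldl (fun st cy => ev.foldl (fun st ey => pvStepA st cy ey) st)
        ((none : Option Int), false)
     if r.2 then true
     else match r.1 with
       | none => false
       | some m => decide (m ≤ 5))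
    = cl.any (fun cy => ev.any (fun ey => pvPairClose cy ey)) := by
  rcases pvOuterA cl ev (none, false) (by simp) with ⟨h1, h2⟩
  simp only []
  by_cases hf : (cl.foldl (fun st cy => ev.foldl (fun st ey => pvStepA st cy ey) st) (none, false)).2 = true
  · rw [if_pos hf]
    rw [hf, Bool.false_or] at h1
    exact h1
  · have hff : (cl.foldl (fun st cy => ev.foldl (fun st ey => pvStepA st cy ey) st) ((none : Option Int), false)).2 = false := by
      simpa using hf
    rw [if_neg (by simp [hff])]
    rw [hff] at h1
    simp at h1
    rcases hr : (cl.foldl (fun st cy => ev.foldl (fun st ey => pvStepA st cy ey) st) (none, false)).1 with _ | m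
    · simp
      exact h1
    · have := h2 hff m hr
      simp [this]
      exact h1

-- membership in B's set of parsed evidence ints
theorem pvMemEvInts (ev : List String) (s : PySem.Set Int) (b : Int) :
    (b ∈ ev.foldl (fun s ey => match PySem.Int.ofStr? ey with
        | some v => PySem.Set.add s v
        | none => s) s)
    ↔ (b ∈ s ∨ ∃ ey ∈ ev, PySem.Int.ofStr? ey = some b) := by
  induction ev generalizing s with
  | nil => simp
  | cons e rest ih =>
    simp only [List.foldl_cons]
    rcases he : PySem.Int.ofStr? e with _ | v
    · rw [ih]
      constructor
      · rintro (h | ⟨ey, hm, hp⟩)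
        · exact Or.inl h
        · exact Or.inr ⟨ey, List.mem_cons_of_mem _ hm, hp⟩
      · rintro (h | ⟨ey, hm, hp⟩)
        · exact Or.inl h
        · rcases List.mem_cons.mp hm with rfl | hm'
          · rw [he] at hp; cases hp
          · exact Or.inr ⟨ey, hm', hp⟩
    · rw [ih]
      simp only [PySem.Set.mem_add]
      constructor
      · rintro (⟨h | rfl⟩ | ⟨ey, hm, hp⟩)
        · exact Or.inl h
        · exact Or.inr ⟨e, List.mem_cons_self , he⟩
        · exact Or.inr ⟨ey, List.mem_cons_of_mem _ hm, hp⟩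
      · rintro (h | ⟨ey, hm, hp⟩)
        · exact Or.inl (Or.inl h)
        · rcases List.mem_cons.mp hm with rfl | hm'
          · rw [he] at hp
            exact Or.inl (Or.inr (by cases hp; rfl))
          · exact Or.inr ⟨ey, hm', hp⟩

-- B's 11 probes equal A's inner any, per claim year
theorem pvCloseB_eq (ev : List String) (cy : String) :
    pvCloseB (ev.foldl (fun s ey => match PySem.Int.ofStr? ey with
        | some v => PySem.Set.add s v
        | none => s) PySem.Set.empty) cy
    = ev.any (fun ey => pvPairClose cy ey) := by
  set evInts := ev.foldl (fun s ey => match PySem.Int.ofStr? ey with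
        | some v => PySem.Set.add s v
        | none => s) PySem.Set.empty with hset
  rcases ha : PySem.Int.ofStr? cy with _ | a
  · simp only [pvCloseB, ha]
    symm
    simp only [List.any_eq_false]
    intro ey _
    simp [pvPairClose, ha]
  · have hmem : ∀ b : Int, (b ∈ evInts) ↔ ∃ ey ∈ ev, PySem.Int.ofStr? ey = some b := by
      intro b
      rw [hset, pvMemEvInts]
      simp [PySem.Set.empty]
    have hrange : PySem.List.pyRange (-5) 6 1 = [-5,-4,-3,-2,-1,0,1,2,3,4,5] := by decide
    simp only [pvCloseB, ha, hrange]
    by_cases hE : ∃ ey ∈ ev, ∃ b, PySem.Int.ofStr? ey = some b ∧ ((a - b).natAbs : Int) ≤ 5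
    · rcases hE with ⟨ey, hm, b, hb, h5⟩
      have hb' : b ∈ evInts := (hmem b).2 ⟨ey, hm, hb⟩
      have hRHS : ev.any (fun ey => pvPairClose cy ey) = true := by
        rw [List.any_eq_true]
        refine ⟨ey, hm, ?_⟩
        simp only [pvPairClose, ha, hb]
        exact decide_eq_true h5
      rw [hRHS]
      rw [List.any_eq_true]
      refine ⟨b - a, ?_, ?_⟩
      · have hn : (a - b).natAbs ≤ 5 := by exact_mod_cast h5
        simp only [List.mem_cons, List.not_mem_nil, or_false]
        omega
      · have : a + (b - a) = b := by ring
        rw [this]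
        exact (PySem.Set.contains_iff _ _).mpr hb'
    · have hRHS : ev.any (fun ey => pvPairClose cy ey) = false := by
        rw [List.any_eq_false]
        intro ey hm
        rcases hb : PySem.Int.ofStr? ey with _ | b
        · simp [pvPairClose, ha, hb]
        · simp only [pvPairClose, ha, hb, decide_eq_true_eq]
          intro h5
          exact hE ⟨ey, hm, b, hb, h5⟩
      rw [hRHS]
      rw [List.any_eq_false]
      intro d hd
      cases hc : PySem.Set.contains evInts (a + d) with
      | false => simp
      | true =>
      exfalso
      have hc' : (a + d) ∈ evInts := (PySem.Set.contains_iff _ _).mp hc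
      rcases (hmem (a + d)).1 hc' with ⟨ey, hm, hp⟩
      apply hE
      refine ⟨ey, hm, a + d, hp, ?_⟩
      have hd' : -5 ≤ d ∧ d ≤ 5 := by
        fin_cases hd <;> norm_num
      omega

-- the two overlap tests agree
theorem pvOverlap (cl ev : List String) :
    (!(PySem.Set.inter (PySem.Set.ofList cl) (PySem.Set.ofList ev)).isEmpty)
    = cl.any (fun cy => PySem.Set.contains (PySem.Set.ofList ev) cy) := by
  by_cases h : ∃ x ∈ cl, x ∈ ev
  · rcases h with ⟨x, hc, he⟩
    have hx : x ∈ PySem.Set.inter (PySem.Set.ofList cl) (PySem.Set.ofList ev) := by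
      rw [PySem.Set.mem_inter]
      exact ⟨(PySem.Set.mem_ofList _ _).mpr hc, (PySem.Set.mem_ofList _ _).mpr he⟩
    have h1 : (PySem.Set.inter (PySem.Set.ofList cl) (PySem.Set.ofList ev)).isEmpty = false := by
      rcases hl : PySem.Set.inter (PySem.Set.ofList cl) (PySem.Set.ofList ev) with _ | ⟨y, t⟩
      · rw [hl] at hx; cases hx
      · rfl
    rw [h1]
    simp only [Bool.not_false]
    symm
    rw [List.any_eq_true]
    exact ⟨x, hc, (PySem.Set.contains_iff _ _).mpr ((PySem.Set.mem_ofList _ _).mpr he)⟩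
  · simp only [not_exists, not_and] at h
    have h1 : (PySem.Set.inter (PySem.Set.ofList cl) (PySem.Set.ofList ev)).isEmpty = true := by
      rw [List.isEmpty_iff, List.eq_nil_iff_forall_not_mem]
      intro x hx
      rw [PySem.Set.mem_inter] at hx
      exact h x ((PySem.Set.mem_ofList _ _).mp hx.1) ((PySem.Set.mem_ofList _ _).mp hx.2)
    rw [h1]
    simp only [Bool.not_true]
    symm
    rw [List.any_eq_false]
    intro x hx
    cases hc : PySem.Set.contains (PySem.Set.ofList ev) x with
    | false => simp
    | true =>
    exact absurd ((PySem.Set.mem_ofList _ _).mp ((PySem.Set.contains_iff _ _).mp hc)) (h x hx)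

-- ===== VERDICT (by name: the statement is the Claim_ definition above) =====
theorem check_temporal_consistency_py_spec : Claim_equal_check_temporal_consistency_py := by
  intro cl ev _hdom
  unfold Spec_check_temporal_consistency_py
  unfold check_temporal_consistency_py check_temporal_consistency_py_alt
  dsimp only
  by_cases hemp : (cl.isEmpty || ev.isEmpty) = true
  · rw [if_pos hemp, if_pos hemp]
  · rw [if_neg hemp, if_neg hemp]
    rw [pvOverlap cl ev]
    by_cases hov : cl.any (fun cy => PySem.Set.contains (PySem.Set.ofList ev) cy) = true
    · rw [if_pos (by simpa using hov), if_pos hov]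
    · rw [if_neg (by simpa using hov), if_neg hov]
      by_cases hlen : 5 ≤ PySem.Set.len (PySem.Set.ofList ev)
      · rw [if_pos hlen, if_pos hlen]
      · rw [if_neg hlen, if_neg hlen]
        rw [pvFinalA cl ev]
        congr 1
        funext cy
        exact (pvCloseB_eq ev cy).symm
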